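-- pv_equiv track=rewrite | github.com/sotamatsuda19/UR_chatbot | peripheral files/clear_json.py | best_field
-- ===== SOURCE A (Python) =====
-- def best_field(sections, field):
--     """
--     Among all sections, returns the longest non-empty value for a given field.
--     Prefers Lecture sections first, then falls back to any section.
--     Longer = more complete (handles cases where a section had a page-break cutoff).
--     """
--     best = ""
--     # First pass: lecture sections only
--     for s in sections:
--         value = s.get(field, "").strip()
--         if s["type"] == "Lecture" and len(value) > len(best):
--             best = value
--
--     # Second pass: any section (if no lecture had content)
--     if not best:
--         for s in sections:
--             value = s.get(field, "").strip()
--             if len(value) > len(best):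
--                 best = value
--
--     return best
-- ===== SOURCE B (Python) =====
-- def best_field(sections, field):
--     """Single pass with two running bests (Lecture-only and any), instead of two passes."""
--     best_lecture = ""
--     best_any = ""
--     for s in sections:
--         value = s.get(field, "").strip()
--         is_lecture = s["type"] == "Lecture"
--         if len(value) > len(best_any):
--             best_any = value
--         if is_lecture and len(value) > len(best_lecture):
--             best_lecture = value
--     return best_lecture if best_lecture else best_any
-- ===== Notes on version B (the rewrite author's own statement) =====
-- stated objective: alternative
-- what changed: Replaces A's two conditional passes (Lecture-only, then fallback over all sections) by a single traversal maintaining two accumulators (best Lecture value and best overall value), choosing between them after the loop.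
import Mathlib
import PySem

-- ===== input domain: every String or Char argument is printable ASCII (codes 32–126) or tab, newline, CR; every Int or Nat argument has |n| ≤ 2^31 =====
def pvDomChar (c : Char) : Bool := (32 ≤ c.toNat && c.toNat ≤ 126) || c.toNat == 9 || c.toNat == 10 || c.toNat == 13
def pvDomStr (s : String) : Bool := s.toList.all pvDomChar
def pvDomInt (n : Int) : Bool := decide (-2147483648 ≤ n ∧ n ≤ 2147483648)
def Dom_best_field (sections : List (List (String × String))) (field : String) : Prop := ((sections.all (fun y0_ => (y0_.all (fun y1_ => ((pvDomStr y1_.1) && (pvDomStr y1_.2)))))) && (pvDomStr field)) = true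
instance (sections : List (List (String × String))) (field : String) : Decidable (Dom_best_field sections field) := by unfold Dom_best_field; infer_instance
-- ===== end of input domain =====

-- B replaces A's two conditional passes by one traversal with two running bests; same cost, different decomposition.


-- ===== PORT A =====
-- value = s.get(field, "").strip()
def pvVal (s : List (String × String)) (field : String) : String :=
  PySem.Str.strip ((PySem.Dict.mk s).getD field "")

-- s["type"] == "Lecture"  (under Pre_, "type" is present; get? is some there)
def pvIsLecture (s : List (String × String)) : Bool :=
  ((PySem.Dict.mk s).get? "type").getD "" == "Lecture"

def best_field (sections : List (List (String × String))) (field : String) : String :=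
  -- first pass: lecture sections only
  let best := sections.foldl (fun best s =>
    let value := pvVal s field
    if pvIsLecture s && decide (PySem.Str.len value > PySem.Str.len best)
    then value else best) ""
  -- second pass: any section, only if best is empty
  if best == "" then
    sections.foldl (fun best s =>
      let value := pvVal s field
      if PySem.Str.len value > PySem.Str.len best then value else best) ""
  else best

-- ===== PORT B =====
def best_field_alt (sections : List (List (String × String))) (field : String) : String :=
  let p := sections.foldl (fun (acc : String × String) s =>
    let value := pvVal s field
    let isLecture := pvIsLecture s
    let bestAny := if PySem.Str.len value > PySem.Str.len acc.2 then value else acc.2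
    let bestLec := if isLecture && decide (PySem.Str.len value > PySem.Str.len acc.1)
                   then value else acc.1
    (bestLec, bestAny)) ("", "")
  if p.1 == "" then p.2 else p.1

-- ===== PRECONDITION & SPEC =====
-- Pre_ excludes sections lacking a "type" key, on which the Python A raises KeyError (B raises there too).
def Pre_best_field (sections : List (List (String × String))) (_field : String) : Prop :=
  ∀ s ∈ sections, (PySem.Dict.mk s).contains "type" = true
instance (sections : List (List (String × String))) (field : String) : Decidable (Pre_best_field sections field) := by unfold Pre_best_field; infer_instance

def pvWitness_best_field : (List (List (String × String))) × String :=
  ([[("type", "Lecture"), ("title", " intro ")], [("type", "Lab"), ("title", "long lab title")]], "title")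

def Spec_best_field (sections : List (List (String × String))) (field : String) (out : String) : Prop := out = best_field_alt sections field
instance (sections : List (List (String × String))) (field : String) (out : String) : Decidable (Spec_best_field sections field out) := by unfold Spec_best_field; infer_instance

-- ===== CLAIM (what is proved, stated in full; the proofs are below) =====
def Claim_equal_best_field : Prop := ∀ (sections : List (List (String × String))) (field : String), Dom_best_field sections field → Pre_best_field sections field → Spec_best_field sections field (best_field sections field)

-- ===== LEMMAS AND PROOFS =====

-- B's paired fold is the pair of A's two independent folds.
theorem pair_fold (sections : List (List (String × String))) (field : String)
    (a b : String) :
    sections.foldl (fun (acc : String × String) s =>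
      let value := pvVal s field
      let isLecture := pvIsLecture s
      let bestAny := if PySem.Str.len value > PySem.Str.len acc.2 then value else acc.2
      let bestLec := if isLecture && decide (PySem.Str.len value > PySem.Str.len acc.1)
                     then value else acc.1
      (bestLec, bestAny)) (a, b)
    = (sections.foldl (fun best s =>
        let value := pvVal s field
        if pvIsLecture s && decide (PySem.Str.len value > PySem.Str.len best)
        then value else best) a,
       sections.foldl (fun best s =>
        let value := pvVal s field
        if PySem.Str.len value > PySem.Str.len best then value else best) b) := by
  induction sections generalizing a b with
  | nil => rfl
  | cons s rest ih => simp only [List.foldl]; exact ih _ _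

-- ===== VERDICT (by name: the statement is the Claim_ definition above) =====
theorem best_field_spec : Claim_equal_best_field := by
  intro sections field _ _
  unfold Spec_best_field best_field best_field_alt
  rw [pair_fold]
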